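-- pv_equiv track=rewrite | github.com/sadgabriel/UGRP | src/statistician.py | _make_graph_from_map_list
-- ===== SOURCE A (Python) =====
-- def _calc_levenshtein_distance(A: str, B: str) -> int:
--     """
--     Calculate the Levenshtein distance between two strings A and B.
--
--     The Levenshtein distance is a measure of the difference between two strings,
--     defined as the minimum number of single-character edits (insertions, deletions,
--     or substitutions) required to change one string into the other.
--
--     Args:
--         A (str): The first string.
--         B (str): The second string.
--
--     Returns:
--         int: The Levenshtein distance between string A and string B.
--     """
--     len_A = len(A)
--     len_B = len(B)
--
--     dp = [[0] * (len_B + 1) for _ in range(len_A + 1)]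
--
--     for i in range(len_A + 1):
--         dp[i][0] = i
--
--     for j in range(len_B + 1):
--         dp[0][j] = j
--
--     for i in range(1, len_A + 1):
--         for j in range(1, len_B + 1):
--             if A[i - 1] == B[j - 1]:
--                 cost = 0
--             else:
--                 cost = 1
--
--             dp[i][j] = min(dp[i - 1][j] + 1, dp[i][j - 1] + 1, dp[i - 1][j - 1] + cost)
--
--     return dp[len_A][len_B]
--
-- def _make_graph_from_map_list(map_list: list[str], threshold: int) -> list[list[int]]:
--     """
--     Create an adjacency list graph from a list of strings based on Levenshtein distance.
--
--     Args:
--         map_list (list[str]): A list of strings to be compared.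
--         threshold (int): The minimum Levenshtein distance required to create an edge between two strings.
--
--     Returns:
--         list[list[int]]: An adjacency list representing the graph, where each index contains a list of indices of connected nodes.
--     """
--     n = len(map_list)
--     edges = [list() for _ in range(n)]
--
--     for i in range(n - 1):
--         for j in range(i + 1, n):
--             if _calc_levenshtein_distance(map_list[i], map_list[j]) >= threshold:
--                 edges[i].append(j)
--                 edges[j].append(i)
--
--     return edges
-- ===== SOURCE B (Python) =====
-- def _make_graph_from_map_list(map_list: list[str], threshold: int) -> list[list[int]]:
--     """Adjacency list via top-down memoized Levenshtein and a precomputed pair set.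
--
--     The edit distance is computed by a memoized recursion rec(i, j) instead of a
--     bottom-up table; the qualifying unordered pairs are collected once into a
--     set, and each node's neighbour list is read off that set by a comprehension.
--     """
--
--     def dist(A: str, B: str) -> int:
--         memo = {}
--
--         def rec(i: int, j: int) -> int:
--             if i == 0:
--                 return j
--             if j == 0:
--                 return i
--             key = (i, j)
--             if key in memo:
--                 return memo[key]
--             cost = 0 if A[i - 1] == B[j - 1] else 1
--             v = min(rec(i - 1, j) + 1, rec(i, j - 1) + 1, rec(i - 1, j - 1) + cost)
--             memo[key] = v
--             return v
--
--         return rec(len(A), len(B))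
--
--     n = len(map_list)
--     far = set()
--     for i in range(n - 1):
--         for j in range(i + 1, n):
--             if dist(map_list[i], map_list[j]) >= threshold:
--                 far.add((i, j))
--
--     return [[j for j in range(n) if (min(i, j), max(i, j)) in far]
--             for i in range(n)]
-- ===== Notes on version B (the rewrite author's own statement) =====
-- stated objective: alternative
-- what changed: Levenshtein is computed by a top-down memoized recursion rec(i,j) with an explicit memo dict instead of filling a bottom-up (len_A+1)x(len_B+1) table, and the graph is built in two stages: the qualifying unordered pairs are collected once into a set, then each adjacency list is read off that set by a comprehension, replacing the imperative double-append over ordered pairs.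
import Mathlib
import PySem

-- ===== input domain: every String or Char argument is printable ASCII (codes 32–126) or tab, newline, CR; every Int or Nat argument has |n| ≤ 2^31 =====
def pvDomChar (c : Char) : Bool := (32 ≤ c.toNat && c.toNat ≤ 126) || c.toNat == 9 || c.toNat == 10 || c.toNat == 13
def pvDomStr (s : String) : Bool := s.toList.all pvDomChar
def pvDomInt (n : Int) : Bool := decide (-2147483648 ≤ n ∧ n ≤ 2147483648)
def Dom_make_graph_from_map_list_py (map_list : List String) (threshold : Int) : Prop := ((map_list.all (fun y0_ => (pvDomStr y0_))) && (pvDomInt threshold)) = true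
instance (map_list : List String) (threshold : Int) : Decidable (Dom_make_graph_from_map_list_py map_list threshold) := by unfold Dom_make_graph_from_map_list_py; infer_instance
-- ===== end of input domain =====

-- B differs: top-down memoized recursion for the edit distance instead of a bottom-up DP
-- table, and a precomputed set of qualifying pairs read off by comprehensions instead of
-- the imperative double-append loops. Equivalence is about return values.
-- ===== PORT A =====
-- _calc_levenshtein_distance: full (len_A+1)x(len_B+1) DP table.
def pvLevA (A B : String) : Int :=
  let a := A.toList
  let b := B.toList
  let lenA := a.length
  let lenB := b.length
  let dp : List (List Int) := List.replicate (lenA + 1) (List.replicate (lenB + 1) 0)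
  let dp := (List.range (lenA + 1)).foldl
      (fun dp i => dp.set i ((dp.getD i []).set 0 (i : Int))) dp
  let dp := (List.range (lenB + 1)).foldl
      (fun dp j => dp.set 0 ((dp.getD 0 []).set j (j : Int))) dp
  let dp := (List.range' 1 lenA).foldl (fun dp i =>
      (List.range' 1 lenB).foldl (fun dp j =>
        let cost : Int := if a.getD (i - 1) ' ' = b.getD (j - 1) ' ' then 0 else 1
        let v := min (min ((dp.getD (i - 1) []).getD j 0 + 1)
                          ((dp.getD i []).getD (j - 1) 0 + 1))
                     ((dp.getD (i - 1) []).getD (j - 1) 0 + cost)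
        dp.set i ((dp.getD i []).set j v)) dp) dp
  (dp.getD lenA []).getD lenB 0

-- _make_graph_from_map_list: nested loops over ordered pairs, appending to both endpoints.
def make_graph_from_map_list_py (map_list : List String) (threshold : Int) : List (List Int) :=
  let n := map_list.length
  let edges : List (List Int) := List.replicate n []
  let edges := (List.range (n - 1)).foldl (fun edges i =>
      (List.range' (i + 1) (n - 1 - i)).foldl (fun edges j =>
        if pvLevA (map_list.getD i "") (map_list.getD j "") ≥ threshold then
          (edges.set i ((edges.getD i []) ++ [(j : Int)])).set j ((edges.getD j []) ++ [(i : Int)])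
        else edges) edges) edges
  edges

-- ===== PORT B =====
-- B's rec(i, j): top-down recursion with the memo dict threaded through (Python's mutable
-- `memo` becomes an explicit state argument; `(i, j) in memo` / `memo[(i,j)] = v` are get?/insert).
def pvRecB (a b : List Char) : Nat → Nat → PySem.Dict (Nat × Nat) Int → Int × PySem.Dict (Nat × Nat) Int
  | 0, j, m => ((j : Int), m)
  | i+1, 0, m => (((i + 1 : Nat) : Int), m)
  | i+1, j+1, m =>
      match m.get? (i+1, j+1) with
      | some v => (v, m)
      | none =>
          let cost : Int := if a.getD i ' ' = b.getD j ' ' then 0 else 1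
          let r1 := pvRecB a b i (j+1) m
          let r2 := pvRecB a b (i+1) j r1.2
          let r3 := pvRecB a b i j r2.2
          let v := min (min (r1.1 + 1) (r2.1 + 1)) (r3.1 + cost)
          (v, r3.2.insert (i+1, j+1) v)
  termination_by i j _ => i + j

-- B's dist: rec(len(A), len(B)) starting from an empty memo.
def pvDistB (A B : String) : Int :=
  (pvRecB A.toList B.toList A.toList.length B.toList.length PySem.Dict.empty).1

-- B's `far`: the set of qualifying unordered pairs (i, j), i < j, built once.
def pvFarB (map_list : List String) (threshold : Int) : PySem.Set (Nat × Nat) :=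
  let n := map_list.length
  (List.range (n - 1)).foldl (fun far i =>
    (List.range' (i + 1) (n - 1 - i)).foldl (fun far j =>
      if pvDistB (map_list.getD i "") (map_list.getD j "") ≥ threshold then
        PySem.Set.add far (i, j)
      else far) far) PySem.Set.empty

def make_graph_from_map_list_py_alt (map_list : List String) (threshold : Int) : List (List Int) :=
  let n := map_list.length
  let far := pvFarB map_list threshold
  (List.range n).map (fun i =>
    ((List.range n).filter (fun j => PySem.Set.contains far (min i j, max i j))).map
      (fun (j : Nat) => (j : Int)))

-- ===== PRECONDITION & SPEC =====
def Spec_make_graph_from_map_list_py (map_list : List String) (threshold : Int) (out : List (List Int)) : Prop := out = make_graph_from_map_list_py_alt map_list threshold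
instance (map_list : List String) (threshold : Int) (out : List (List Int)) : Decidable (Spec_make_graph_from_map_list_py map_list threshold out) := by unfold Spec_make_graph_from_map_list_py; infer_instance

-- ===== CLAIM (what is proved, stated in full; the proofs are below) =====
def Claim_equal_make_graph_from_map_list_py : Prop := ∀ (map_list : List String) (threshold : Int), Dom_make_graph_from_map_list_py map_list threshold → Spec_make_graph_from_map_list_py map_list threshold (make_graph_from_map_list_py map_list threshold)

-- ===== LEMMAS AND PROOFS =====

lemma getD_at {α : Type} (l₁ l₂ : List α) (x d : α) (k : Nat) (h : l₁.length = k) :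
    (l₁ ++ x :: l₂).getD k d = x := by subst h; simp [List.getD]

lemma set_at {α : Type} (l₁ l₂ : List α) (v : α) (k : Nat) (h : l₁.length = k) :
    (l₁ ++ l₂).set k v = l₁ ++ l₂.set 0 v := by subst h; simp

lemma init1 (m N k : Nat) (hk : k ≤ N) :
    (List.range k).foldl (fun dp i => dp.set i ((dp.getD i []).set 0 (i : Int)))
        (List.replicate N (List.replicate (m+1) (0:Int))) =
      (List.range k).map (fun (i : Nat) => (i : Int) :: List.replicate m 0) ++
        List.replicate (N-k) (List.replicate (m+1) 0) := by
  induction k with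
  | zero => simp
  | succ k ih =>
    rw [List.range_succ, List.foldl_append, ih (by omega), List.foldl_cons, List.foldl_nil]
    have hNk : N - k = (N - (k+1)) + 1 := by omega
    rw [hNk, List.replicate_succ]
    rw [getD_at _ _ _ _ _ (by simp)]
    rw [set_at _ _ _ _ (by simp)]
    simp [List.replicate_succ]

lemma head_loop (L : List Nat) (r : List Int) (rest : List (List Int)) :
    L.foldl (fun dp j => dp.set 0 ((dp.getD 0 []).set j (j : Int))) (r :: rest) =
      (L.foldl (fun r j => r.set j (j : Int)) r) :: rest := by
  induction L generalizing r with
  | nil => simp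
  | cons x L ih =>
    rw [List.foldl_cons, List.foldl_cons,
        show ((r::rest).set 0 (((r::rest).getD 0 []).set x (x : Int))) = (r.set x (x : Int)) :: rest from by simp]
    exact ih _

lemma init2 (m k : Nat) (hk : k ≤ m+1) :
    (List.range k).foldl (fun r j => r.set j (j : Int)) (List.replicate (m+1) (0:Int)) =
      (List.range k).map (fun (j : Nat) => (j : Int)) ++ List.replicate (m+1-k) 0 := by
  induction k with
  | zero => simp
  | succ k ih =>
    rw [List.range_succ, List.foldl_append, ih (by omega), List.foldl_cons, List.foldl_nil]
    have hmk : m + 1 - k = (m - k) + 1 := by omega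
    rw [hmk, List.replicate_succ]
    rw [set_at _ _ _ _ (by simp)]
    simp

def levFn (a b : List Char) : Nat → Nat → Int
  | 0, j => (j : Int)
  | i+1, 0 => ((i : Int) + 1)
  | i+1, j+1 =>
      min (min (levFn a b i (j+1) + 1) (levFn a b (i+1) j + 1))
          (levFn a b i j + (if a.getD i ' ' = b.getD j ' ' then 0 else 1))
  termination_by i j => i + j

def rowSpec (a b : List Char) (i : Nat) : List Int :=
  (List.range (b.length + 1)).map (fun j => levFn a b i j)

lemma levFn_zero_left (a b : List Char) (j : Nat) : levFn a b 0 j = (j : Int) := by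
  simp [levFn]

lemma levFn_zero_right (a b : List Char) (i : Nat) : levFn a b i 0 = (i : Int) := by
  cases i <;> simp [levFn]

lemma levFn_succ (a b : List Char) (i j : Nat) :
    levFn a b (i+1) (j+1) =
      min (min (levFn a b i (j+1) + 1) (levFn a b (i+1) j + 1))
          (levFn a b i j + (if a.getD i ' ' = b.getD j ' ' then 0 else 1)) := by
  rw [levFn]

def rowPartial (a b : List Char) (i t : Nat) : List Int :=
  (List.range (t+1)).map (fun j => levFn a b i j) ++ List.replicate (b.length - t) 0

def dpState (a b : List Char) (i t : Nat) : List (List Int) :=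
  (List.range i).map (rowSpec a b) ++
    rowPartial a b i t :: (List.range' (i+1) (a.length - i)).map (fun (i' : Nat) => (i' : Int) :: List.replicate b.length 0)

lemma getD_map_range' {α : Type} (n k : Nat) (f : Nat → α) (d : α) (h : k < n) :
    ((List.range n).map f).getD k d = f k := PySem.List.getD_map_range f n k d h

lemma innerA (a b : List Char) (i : Nat) (hi1 : 1 ≤ i) (hin : i ≤ a.length) (t : Nat) (ht : t ≤ b.length) :
    (List.range' 1 t).foldl (fun dp j =>
        let cost : Int := if a.getD (i - 1) ' ' = b.getD (j - 1) ' ' then 0 else 1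
        let v := min (min ((dp.getD (i - 1) []).getD j 0 + 1)
                          ((dp.getD i []).getD (j - 1) 0 + 1))
                     ((dp.getD (i - 1) []).getD (j - 1) 0 + cost)
        dp.set i ((dp.getD i []).set j v)) (dpState a b i 0) = dpState a b i t := by
  induction t with
  | zero => rfl
  | succ t ih =>
    rw [List.range'_1_concat, List.foldl_append, ih (by omega), List.foldl_cons, List.foldl_nil]
    rw [show 1 + t = t + 1 from Nat.add_comm 1 t]
    have hrowlen : ((List.range i).map (rowSpec a b)).length = i := by simp
    have hgi : (dpState a b i t).getD i [] = rowPartial a b i t := by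
      rw [dpState]; exact getD_at _ _ _ _ _ hrowlen
    have hgprev : (dpState a b i t).getD (i-1) [] = rowSpec a b (i-1) := by
      rw [dpState, List.getD_append _ _ _ _ (by simp; omega), getD_map_range' _ _ _ _ (by omega)]
    have hup : (rowSpec a b (i-1)).getD (t+1) 0 = levFn a b (i-1) (t+1) := by
      rw [rowSpec, getD_map_range' _ _ _ _ (by omega)]
    have hdiag : (rowSpec a b (i-1)).getD (t+1-1) 0 = levFn a b (i-1) t := by
      rw [rowSpec, getD_map_range' _ _ _ _ (by omega)]; norm_num
    have hleft : (rowPartial a b i t).getD (t+1-1) 0 = levFn a b i t := by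
      rw [rowPartial, List.getD_append _ _ _ _ (by simp), getD_map_range' _ _ _ _ (by omega)]
      norm_num
    simp only [hgi, hgprev, hup, hdiag, hleft]
    have hv : min (min (levFn a b (i-1) (t+1) + 1) (levFn a b i t + 1))
        (levFn a b (i-1) t + (if a.getD (i-1) ' ' = b.getD (t+1-1) ' ' then (0:Int) else 1)) =
        levFn a b i (t+1) := by
      obtain ⟨i', rfl⟩ : ∃ i', i = i' + 1 := ⟨i - 1, by omega⟩
      simp only [Nat.add_sub_cancel]
      rw [levFn_succ]
    rw [hv]
    have hsetrow : (rowPartial a b i t).set (t+1) (levFn a b i (t+1)) = rowPartial a b i (t+1) := by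
      rw [rowPartial, set_at _ _ _ _ (by simp)]
      rw [rowPartial, show t+1+1 = (t+1)+1 from rfl, List.range_succ, List.map_append]
      have : b.length - t = (b.length - (t+1)) + 1 := by omega
      rw [this, List.replicate_succ]
      simp [List.range_succ]
    rw [hsetrow]
    rw [dpState, set_at _ _ _ _ hrowlen, dpState]
    simp

lemma range_map_cons {α : Type} (n : Nat) (f : Nat → α) :
    (List.range (n+1)).map f = f 0 :: (List.range' 1 n).map f := by
  rw [List.range_eq_range', List.range'_succ, List.map_cons]

lemma mainA (a b : List Char) (k : Nat) (hk : k ≤ a.length) :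
    (List.range' 1 k).foldl (fun dp i =>
      (List.range' 1 b.length).foldl (fun dp j =>
        let cost : Int := if a.getD (i - 1) ' ' = b.getD (j - 1) ' ' then 0 else 1
        let v := min (min ((dp.getD (i - 1) []).getD j 0 + 1)
                          ((dp.getD i []).getD (j - 1) 0 + 1))
                     ((dp.getD (i - 1) []).getD (j - 1) 0 + cost)
        dp.set i ((dp.getD i []).set j v)) dp)
      (rowSpec a b 0 :: (List.range' 1 a.length).map (fun (i : Nat) => (i : Int) :: List.replicate b.length 0)) =
    (List.range (k+1)).map (rowSpec a b) ++
      (List.range' (k+1) (a.length - k)).map (fun (i : Nat) => (i : Int) :: List.replicate b.length 0) := by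
  induction k with
  | zero =>
    rw [List.range'_zero, List.foldl_nil]
    rw [range_map_cons 0]
    simp
  | succ k ih =>
    rw [List.range'_1_concat, List.foldl_append, ih (by omega), List.foldl_cons, List.foldl_nil,
        show 1 + k = k + 1 from Nat.add_comm 1 k]
    have hstart : (List.range (k+1)).map (rowSpec a b) ++
        (List.range' (k+1) (a.length - k)).map (fun (i : Nat) => (i : Int) :: List.replicate b.length 0) =
        dpState a b (k+1) 0 := by
      rw [dpState]
      have h1 : a.length - k = (a.length - (k+1)) + 1 := by omega
      rw [h1, List.range'_succ, List.map_cons]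
      rw [rowPartial]
      simp [levFn_zero_right]
    rw [hstart, innerA a b (k+1) (by omega) (by omega) b.length le_rfl]
    rw [dpState, rowPartial]
    simp [List.range_succ, rowSpec]

lemma levA_eq (A B : String) :
    pvLevA A B = levFn A.toList B.toList A.toList.length B.toList.length := by
  simp only [pvLevA]
  rw [init1 B.toList.length (A.toList.length+1) (A.toList.length+1) le_rfl]
  simp only [Nat.sub_self, List.replicate_zero, List.append_nil]
  rw [range_map_cons]
  rw [head_loop]
  rw [show ((0:Nat) : Int) :: List.replicate B.toList.length (0:Int) = List.replicate (B.toList.length+1) 0 from by simp [List.replicate_succ]]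
  rw [init2 B.toList.length (B.toList.length+1) le_rfl]
  simp only [Nat.sub_self, List.replicate_zero, List.append_nil]
  have hrow0 : (List.range (B.toList.length+1)).map (fun (j : Nat) => (j : Int)) = rowSpec A.toList B.toList 0 := by
    rw [rowSpec]
    exact List.map_congr_left (fun j _ => (levFn_zero_left _ _ _).symm)
  rw [hrow0]
  rw [mainA A.toList B.toList A.toList.length le_rfl]
  simp only [Nat.sub_self, List.range'_zero, List.map_nil, List.append_nil]
  rw [getD_map_range' _ _ _ _ (by omega), rowSpec, getD_map_range' _ _ _ _ (by omega)]

-- ===== B-side lemmas: the memoized recursion computes levFn =====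

def goodMemo (a b : List Char) (m : PySem.Dict (Nat × Nat) Int) : Prop :=
  ∀ p v, m.get? p = some v → v = levFn a b p.1 p.2

lemma recB_correct (a b : List Char) : ∀ (N i j : Nat) (m : PySem.Dict (Nat × Nat) Int),
    i + j ≤ N → goodMemo a b m →
    (pvRecB a b i j m).1 = levFn a b i j ∧ goodMemo a b (pvRecB a b i j m).2 := by
  intro N
  induction N with
  | zero =>
    intro i j m hle hm
    obtain ⟨rfl, rfl⟩ : i = 0 ∧ j = 0 := by omega
    exact ⟨by simp [pvRecB, levFn_zero_left], by simpa [pvRecB] using hm⟩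
  | succ N ih =>
    intro i j m hle hm
    match i, j with
    | 0, j => exact ⟨by simp [pvRecB, levFn_zero_left], by simpa [pvRecB] using hm⟩
    | i+1, 0 =>
      refine ⟨?_, by simpa [pvRecB] using hm⟩
      rw [levFn_zero_right]
      simp [pvRecB]
    | i+1, j+1 =>
      cases h : m.get? (i+1, j+1) with
      | some v =>
        refine ⟨?_, by simpa [pvRecB, h] using hm⟩
        have := hm (i+1, j+1) v h
        simp [pvRecB, h, this]
      | none =>
        obtain ⟨e1, g1⟩ := ih i (j+1) m (by omega) hm
        obtain ⟨e2, g2⟩ := ih (i+1) j _ (by omega) g1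
        obtain ⟨e3, g3⟩ := ih i j _ (by omega) g2
        have hv : min (min ((pvRecB a b i (j+1) m).1 + 1)
              ((pvRecB a b (i+1) j (pvRecB a b i (j+1) m).2).1 + 1))
            ((pvRecB a b i j (pvRecB a b (i+1) j (pvRecB a b i (j+1) m).2).2).1 +
              (if a.getD i ' ' = b.getD j ' ' then (0:Int) else 1)) = levFn a b (i+1) (j+1) := by
          rw [e1, e2, e3, levFn_succ]
        constructor
        · simp only [pvRecB, h]
          exact hv
        · simp only [pvRecB, h]
          intro p v hpv
          rw [PySem.Dict.get?_insert] at hpv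
          split at hpv
          · rename_i hp
            injection hpv with hv2
            subst hp
            rw [← hv2]
            simpa using hv
          · exact g3 p v hpv

lemma distB_eq (A B : String) :
    pvDistB A B = levFn A.toList B.toList A.toList.length B.toList.length := by
  have hempty : goodMemo A.toList B.toList PySem.Dict.empty := by
    intro p v h
    simp [PySem.Dict.get?_empty] at h
  exact (recB_correct A.toList B.toList (A.toList.length + B.toList.length) _ _ _ le_rfl hempty).1

-- ===== B-side lemmas: membership in the pair set =====

def farCond (n : Nat) (c : Nat → Nat → Bool) (iC jC : Nat) (p : Nat × Nat) : Prop :=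
  p.1 < p.2 ∧ p.2 < n ∧ c p.1 p.2 = true ∧ (p.1 < iC ∨ (p.1 = iC ∧ p.2 < jC))

lemma farInner (n : Nat) (c : Nat → Nat → Bool) (i : Nat) (hi : i < n)
    (S : PySem.Set (Nat × Nat)) (hS : ∀ p, p ∈ S ↔ farCond n c i (i+1) p)
    (t : Nat) (ht : t ≤ n-1-i) :
    ∀ p, p ∈ (List.range' (i+1) t).foldl (fun far j =>
        if c i j = true then PySem.Set.add far (i, j) else far) S ↔
      farCond n c i (i+1+t) p := by
  induction t with
  | zero =>
    intro p
    rw [List.range'_zero, List.foldl_nil]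
    exact hS p
  | succ t ih =>
    intro p
    rw [List.range'_concat, List.foldl_append, List.foldl_cons, List.foldl_nil]
    have hih := ih (by omega)
    simp only [Nat.one_mul]
    by_cases hc : c i (i+1+t) = true
    · rw [if_pos hc, PySem.Set.mem_add, hih p]
      unfold farCond
      constructor
      · rintro (⟨h1, h2, h3, h4⟩ | rfl)
        · exact ⟨h1, h2, h3, by omega⟩
        · exact ⟨by omega, by omega, hc, by omega⟩
      · rintro ⟨h1, h2, h3, h4⟩
        by_cases hp : p = (i, i+1+t)
        · exact Or.inr hp
        · left
          refine ⟨h1, h2, h3, ?_⟩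
          have : ¬ (p.1 = i ∧ p.2 = i+1+t) := by
            intro ⟨hx, hy⟩; exact hp (Prod.ext hx hy)
          omega
    · rw [if_neg hc, hih p]
      unfold farCond
      constructor
      · rintro ⟨h1, h2, h3, h4⟩; exact ⟨h1, h2, h3, by omega⟩
      · rintro ⟨h1, h2, h3, h4⟩
        refine ⟨h1, h2, h3, ?_⟩
        have : ¬ (p.1 = i ∧ p.2 = i+1+t) := by
          intro ⟨hx, hy⟩
          rw [hx, hy] at h3
          exact hc h3
        omega

lemma farOuter (n : Nat) (c : Nat → Nat → Bool) (k : Nat) (hk : k ≤ n-1) :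
    ∀ p, p ∈ (List.range k).foldl (fun far i =>
        (List.range' (i+1) (n-1-i)).foldl (fun far j =>
          if c i j = true then PySem.Set.add far (i, j) else far) far) PySem.Set.empty ↔
      farCond n c k (k+1) p := by
  induction k with
  | zero =>
    intro p
    simp only [List.range_zero, List.foldl_nil]
    unfold farCond
    constructor
    · intro h; cases h
    · rintro ⟨h1, h2, h3, h4⟩; omega
  | succ k ih =>
    intro p
    rw [List.range_succ, List.foldl_append, List.foldl_cons, List.foldl_nil]
    rw [farInner n c k (by omega) _ (ih (by omega)) (n-1-k) le_rfl p]
    unfold farCond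
    constructor
    · rintro ⟨h1, h2, h3, h4⟩; exact ⟨h1, h2, h3, by omega⟩
    · rintro ⟨h1, h2, h3, h4⟩; exact ⟨h1, h2, h3, by omega⟩

lemma farB_mem (map_list : List String) (threshold : Int) (p : Nat × Nat) :
    p ∈ pvFarB map_list threshold ↔
      (p.1 < p.2 ∧ p.2 < map_list.length ∧
        pvDistB (map_list.getD p.1 "") (map_list.getD p.2 "") ≥ threshold) := by
  have h := farOuter map_list.length
      (fun i j => decide (pvDistB (map_list.getD i "") (map_list.getD j "") ≥ threshold))
      (map_list.length - 1) le_rfl p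
  simp only [decide_eq_true_eq] at h
  rw [pvFarB]
  rw [h]
  unfold farCond
  simp only [decide_eq_true_eq]
  constructor
  · rintro ⟨h1, h2, h3, _⟩; exact ⟨h1, h2, h3⟩
  · rintro ⟨h1, h2, h3⟩; exact ⟨h1, h2, h3, by omega⟩

-- ===== A-side lemmas: the double-append loop builds per-node filters =====

def gpred (c : Nat → Nat → Bool) (iC jC : Nat) (k j : Nat) : Bool :=
  decide (j ≠ k ∧ (min j k < iC ∨ (min j k = iC ∧ max j k < jC))) && c (min j k) (max j k)

def edgesPart (n : Nat) (c : Nat → Nat → Bool) (iC jC : Nat) : List (List Int) :=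
  (List.range n).map (fun k => ((List.range n).filter (gpred c iC jC k)).map (fun (j : Nat) => (j : Int)))

def edgesSpec (n : Nat) (c : Nat → Nat → Bool) : List (List Int) :=
  (List.range n).map (fun k =>
    ((List.range n).filter (fun j => j != k && c (min j k) (max j k))).map (fun (j : Nat) => (j : Int)))

lemma filter_range_snoc (n t : Nat) (p p' : Nat → Bool) (ht : t < n)
    (agree : ∀ x, x ≠ t → p' x = p x) (hpt : p t = false) (hp't : p' t = true)
    (hafter : ∀ x, t < x → x < n → p' x = false) :
    (List.range n).filter p' = (List.range n).filter p ++ [t] := by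
  have h2 : (t+1) + (n-(t+1)) = n := by omega
  have hsplit : List.range n = List.range (t+1) ++ List.range' (t+1) (n-(t+1)) := by
    rw [List.range_eq_range', ← h2, ← List.range'_append_1, List.range_eq_range']
    simp
  have hpre : (List.range t).filter p' = (List.range t).filter p := by
    apply List.filter_congr
    intro x hx
    simp at hx
    exact agree x (by omega)
  have hsuf : ∀ q : Nat → Bool, (∀ x, t < x → x < n → q x = false) →
      (List.range' (t+1) (n-(t+1))).filter q = [] := by
    intro q hq
    rw [List.filter_eq_nil_iff]
    intro x hx
    simp [List.mem_range'_1] at hx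
    simp [hq x (by omega) (by omega)]
  rw [hsplit, List.filter_append, List.filter_append, List.range_succ, List.filter_append,
      List.filter_append, hpre, hsuf p' hafter,
      hsuf p (fun x h1 h2 => by rw [← agree x (by omega)]; exact hafter x h1 h2)]
  simp [hpt, hp't]

lemma set_map_range {α : Type} (n : Nat) (f : Nat → α) (t : Nat) (v : α) :
    ((List.range n).map f).set t v = (List.range n).map (fun k => if k = t then v else f k) := by
  apply List.ext_getElem
  · simp
  · intro i h1 h2
    simp only [List.getElem_set, List.getElem_map, List.getElem_range]
    rcases eq_or_ne i t with h | h
    · simp [h]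
    · rw [if_neg (by omega), if_neg h]

lemma mapfilter_congr (n : Nat) (p q : Nat → Nat → Bool)
    (h : ∀ k, k < n → ∀ j, j < n → p k j = q k j) :
    (List.range n).map (fun k => ((List.range n).filter (p k)).map (fun (j : Nat) => (j : Int))) =
    (List.range n).map (fun k => ((List.range n).filter (q k)).map (fun (j : Nat) => (j : Int))) := by
  apply List.map_congr_left
  intro k hk
  simp only [List.mem_range] at hk
  congr 1
  apply List.filter_congr
  intro j hj
  simp only [List.mem_range] at hj
  exact h k hk j hj

lemma gpred_pair_true (c : Nat → Nat → Bool) (i j : Nat) (hij : i < j) (hc : c i j = true) :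
    gpred c i (j+1) j i = true ∧ gpred c i (j+1) i j = true := by
  unfold gpred
  rw [show min i j = i from by omega, show max i j = j from by omega,
      show min j i = i from by omega, show max j i = j from by omega, hc]
  constructor <;> (rw [decide_eq_true (by omega)]; simp)

lemma step_true (n : Nat) (c : Nat → Nat → Bool) (i j : Nat) (hij : i < j) (hj : j < n)
    (hc : c i j = true) :
    (((edgesPart n c i j).set i (((edgesPart n c i j).getD i []) ++ [(j : Int)])).set j
        (((edgesPart n c i j).getD j []) ++ [(i : Int)]))
      = edgesPart n c i (j+1) := by
  have hi : i < n := by omega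
  have hgi : (edgesPart n c i j).getD i [] =
      ((List.range n).filter (gpred c i j i)).map (fun (x : Nat) => (x : Int)) := by
    rw [edgesPart]; exact getD_map_range' _ _ _ _ hi
  have hgj : (edgesPart n c i j).getD j [] =
      ((List.range n).filter (gpred c i j j)).map (fun (x : Nat) => (x : Int)) := by
    rw [edgesPart]; exact getD_map_range' _ _ _ _ hj
  rw [hgi, hgj, edgesPart, set_map_range, set_map_range, edgesPart]
  apply List.map_congr_left
  intro k hk
  simp only [List.mem_range] at hk
  by_cases hkj : k = j
  · rw [if_pos hkj, hkj]
    rw [filter_range_snoc n i (gpred c i j j) (gpred c i (j+1) j) (by omega)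
          (fun x hx => by unfold gpred; congr 1; exact decide_eq_decide.mpr (by omega))
          (by unfold gpred; rw [decide_eq_false (by omega)]; simp)
          ((gpred_pair_true c i j hij hc).1)
          (fun x h1 h2 => by unfold gpred; rw [decide_eq_false (by omega)]; simp)]
    simp
  · rw [if_neg hkj]
    by_cases hki : k = i
    · rw [if_pos hki, hki]
      rw [filter_range_snoc n j (gpred c i j i) (gpred c i (j+1) i) hj
            (fun x hx => by unfold gpred; congr 1; exact decide_eq_decide.mpr (by omega))
            (by unfold gpred; rw [decide_eq_false (by omega)]; simp)
            ((gpred_pair_true c i j hij hc).2)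
            (fun x h1 h2 => by unfold gpred; rw [decide_eq_false (by omega)]; simp)]
      simp
    · rw [if_neg hki]
      congr 1
      apply List.filter_congr
      intro x hx
      unfold gpred
      congr 1
      exact decide_eq_decide.mpr (by omega)

lemma step_false (n : Nat) (c : Nat → Nat → Bool) (i j : Nat) (_hij : i < j) (_hj : j < n)
    (hc : c i j = false) : edgesPart n c i j = edgesPart n c i (j+1) := by
  rw [edgesPart, edgesPart]
  apply mapfilter_congr
  intro k hk x hx
  by_cases hm : min x k = i ∧ max x k = j
  · simp [gpred, hm.1, hm.2, hc]
  · rw [gpred, gpred]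
    congr 1
    exact decide_eq_decide.mpr (by omega)

lemma graphInner (n : Nat) (c : Nat → Nat → Bool) (i : Nat) (hi : i < n) (t : Nat) (ht : t ≤ n-1-i) :
    (List.range' (i+1) t).foldl (fun edges j =>
        if c i j = true then
          (edges.set i ((edges.getD i []) ++ [(j : Int)])).set j ((edges.getD j []) ++ [(i : Int)])
        else edges) (edgesPart n c i (i+1)) = edgesPart n c i (i+1+t) := by
  induction t with
  | zero => simp
  | succ t ih =>
    rw [List.range'_concat, List.foldl_append, ih (by omega), List.foldl_cons, List.foldl_nil]
    simp only [Nat.one_mul]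
    have hij : i < i+1+t := by omega
    have hjn : i+1+t < n := by omega
    rw [show i+1+(t+1) = (i+1+t)+1 from by omega]
    by_cases hc : c i (i+1+t) = true
    · rw [if_pos hc]
      exact step_true n c i (i+1+t) hij hjn hc
    · rw [if_neg hc]
      exact step_false n c i (i+1+t) hij hjn (by revert hc; cases c i (i+1+t) <;> simp)

lemma graphOuter (n : Nat) (c : Nat → Nat → Bool) (k : Nat) (hk : k ≤ n-1) :
    (List.range k).foldl (fun edges i =>
      (List.range' (i + 1) (n - 1 - i)).foldl (fun edges j =>
        if c i j = true then
          (edges.set i ((edges.getD i []) ++ [(j : Int)])).set j ((edges.getD j []) ++ [(i : Int)])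
        else edges) edges) (List.replicate n []) = edgesPart n c k (k+1) := by
  induction k with
  | zero =>
    rw [List.range_zero, List.foldl_nil]
    rw [edgesPart]
    rw [show (List.replicate n ([] : List Int)) = (List.range n).map (fun _ => ([] : List Int)) from by
      simp [List.map_const', List.length_range]]
    apply List.map_congr_left
    intro k hk'
    simp only [List.mem_range] at hk'
    rw [show ((List.range n).filter (gpred c 0 1 k)) = [] from by
      rw [List.filter_eq_nil_iff]
      intro x hx
      unfold gpred
      rw [decide_eq_false (by omega)]
      simp]
    simp
  | succ k ih =>
    rw [List.range_succ, List.foldl_append, ih (by omega), List.foldl_cons, List.foldl_nil]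
    rw [graphInner n c k (by omega) (n-1-k) le_rfl]
    rw [show k+1+(n-1-k) = n from by omega]
    rw [edgesPart, edgesPart]
    apply mapfilter_congr
    intro k' hk' x hx
    unfold gpred
    congr 1
    exact decide_eq_decide.mpr (by omega)

lemma graph_loop (n : Nat) (c : Nat → Nat → Bool) :
    (List.range (n-1)).foldl (fun edges i =>
      (List.range' (i + 1) (n - 1 - i)).foldl (fun edges j =>
        if c i j = true then
          (edges.set i ((edges.getD i []) ++ [(j : Int)])).set j ((edges.getD j []) ++ [(i : Int)])
        else edges) edges) (List.replicate n []) = edgesSpec n c := by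
  rw [graphOuter n c (n-1) le_rfl]
  rw [edgesPart, edgesSpec]
  apply List.map_congr_left
  intro k hk
  simp only [List.mem_range] at hk
  congr 1
  apply List.filter_congr
  intro x hx
  simp only [List.mem_range] at hx
  unfold gpred
  have hbne : (x != k) = decide (x ≠ k) := by
    by_cases h : x = k <;> simp [h]
  rw [hbne]
  congr 1
  exact decide_eq_decide.mpr (by omega)

lemma levAB (A B : String) : pvLevA A B = pvDistB A B := by
  rw [levA_eq, distB_eq]

lemma port_eq (map_list : List String) (threshold : Int) :
    make_graph_from_map_list_py map_list threshold = make_graph_from_map_list_py_alt map_list threshold := by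
  have h1 := graph_loop map_list.length
      (fun i j => decide (pvLevA (map_list.getD i "") (map_list.getD j "") ≥ threshold))
  simp only [decide_eq_true_eq] at h1
  rw [make_graph_from_map_list_py]
  rw [h1]
  rw [make_graph_from_map_list_py_alt, edgesSpec]
  apply List.map_congr_left
  intro k hk
  simp only [List.mem_range] at hk
  congr 1
  apply List.filter_congr
  intro x hx
  simp only [List.mem_range] at hx
  -- both sides are Bools deciding the same membership condition
  have hmem := farB_mem map_list threshold (min k x, max k x)
  have hcont : PySem.Set.contains (pvFarB map_list threshold) (min k x, max k x) = true ↔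
      (min k x < max k x ∧ max k x < map_list.length ∧
        pvDistB (map_list.getD (min k x) "") (map_list.getD (max k x) "") ≥ threshold) := by
    rw [PySem.Set.contains_iff]
    exact hmem
  have hdist : pvLevA (map_list.getD (min x k) "") (map_list.getD (max x k) "") ≥ threshold ↔
      pvDistB (map_list.getD (min k x) "") (map_list.getD (max k x) "") ≥ threshold := by
    rw [levAB, Nat.min_comm, Nat.max_comm]
  cases hb : (x != k && decide (pvLevA (map_list.getD (min x k) "") (map_list.getD (max x k) "") ≥ threshold)) with
  | true =>
    simp only [Bool.and_eq_true, bne_iff_ne, decide_eq_true_eq] at hb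
    exact (hcont.mpr ⟨by omega, by omega, hdist.mp hb.2⟩).symm
  | false =>
    cases hc : PySem.Set.contains (pvFarB map_list threshold) (min k x, max k x) with
    | true =>
      exfalso
      have h2 := hcont.mp hc
      have hxk : x ≠ k := by omega
      have hge : pvLevA (map_list.getD (min x k) "") (map_list.getD (max x k) "") ≥ threshold :=
        hdist.mpr h2.2.2
      simp only [Bool.and_eq_false_iff, bne_eq_false_iff_eq, decide_eq_false_iff_not] at hb
      rcases hb with hb | hb
      · exact hxk hb
      · exact hb hge
    | false => rfl

-- ===== VERDICT (by name: the statement is the Claim_ definition above) =====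
theorem make_graph_from_map_list_py_spec : Claim_equal_make_graph_from_map_list_py := by
  intro map_list threshold _
  unfold Spec_make_graph_from_map_list_py
  exact port_eq map_list threshold
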